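-- pv_equiv track=rewrite | github.com/patrielinger/EleccionReinaPascal | server.py | is_local_ip
-- ===== SOURCE A (Python) =====
-- import ipaddress
--
-- def is_local_ip(ip_str):
--     try:
--         ip = ipaddress.ip_address(ip_str)
--         local_networks = [
--             ipaddress.ip_network('127.0.0.0/8'),
--             ipaddress.ip_network('192.168.0.0/16'),
--             ipaddress.ip_network('10.0.0.0/8'),
--             ipaddress.ip_network('172.16.0.0/12'),
--             ipaddress.ip_network('169.254.0.0/16'),
--         ]
--         return any(ip in network for network in local_networks)
--     except ValueError:
--         return False
-- ===== SOURCE B (Python) =====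
-- def is_local_ip(ip_str):
--     parts = ip_str.split('.')
--     if len(parts) != 4:
--         return False
--     octs = []
--     for p in parts:
--         if not p.isdigit() or len(p) > 3:
--             return False
--         if p[0] == '0' and len(p) > 1:
--             return False
--         v = int(p)
--         if v > 255:
--             return False
--         octs.append(v)
--     a, b, c, d = octs
--     return (a == 127 or a == 10
--             or (a == 192 and b == 168)
--             or (a == 172 and 16 <= b <= 31)
--             or (a == 169 and b == 254))
-- ===== Notes on version B (the rewrite author's own statement) =====
-- stated objective: faster
-- what changed: B drops the ipaddress module entirely: it splits the string into four octets by hand (same strict rules: 1-3 ASCII digits, no leading zero, <=255) and decides locality by comparing the first one or two octets directly, instead of constructing an ip_address object plus five ip_network objects per call and testing membership.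
import Mathlib
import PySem

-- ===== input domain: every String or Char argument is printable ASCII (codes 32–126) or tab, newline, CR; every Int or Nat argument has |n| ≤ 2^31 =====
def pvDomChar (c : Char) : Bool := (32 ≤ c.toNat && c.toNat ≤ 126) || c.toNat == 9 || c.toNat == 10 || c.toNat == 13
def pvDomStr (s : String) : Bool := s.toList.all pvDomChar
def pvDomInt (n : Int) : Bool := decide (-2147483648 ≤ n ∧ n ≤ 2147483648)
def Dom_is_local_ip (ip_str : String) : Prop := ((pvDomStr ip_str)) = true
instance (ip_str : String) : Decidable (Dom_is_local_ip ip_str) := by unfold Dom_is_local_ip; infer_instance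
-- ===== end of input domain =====

-- B replaces ipaddress objects and the five per-call network constructions by a hand parse of the
-- four octets and direct octet comparisons (constant-factor change; return value only, no mutation).

-- ===== PORT A =====

-- int value of a nonempty all-ASCII-digit string (exact there: both ipaddress's octet parse and
-- Source B's int(p) are only applied after an isdigit guard).
def pvDigitsVal (cs : List Char) : Nat := cs.foldl (fun a c => a * 10 + (c.toNat - 48)) 0

-- Models ipaddress's IPv4 octet parse (_parse_octet): 1..3 ASCII digits, no leading zero, ≤ 255.
def pvOctet? (cs : List Char) : Option Nat :=
  if cs.length = 0 ∨ 3 < cs.length then none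
  else if ¬ (cs.all PySem.Chars.isdigit) then none
  else if 1 < cs.length ∧ cs.head? = some '0' then none
  else if 255 < pvDigitsVal cs then none
  else some (pvDigitsVal cs)

-- Models ipaddress.ip_address for A's use of it: `some (integer form)` on a valid IPv4 string.
-- Exact for A's OUTPUT on every string: an invalid string raises ValueError (A's except-branch,
-- False) and a valid IPv6 address is in none of A's five IPv4-only networks (`ip in network`
-- compares versions first), also False — both are the `none` branch.
def pvIpAddress? (s : String) : Option Nat :=
  match PySem.Chars.splitOn s.toList ['.'] with
  | [a, b, c, d] =>
    match pvOctet? a, pvOctet? b, pvOctet? c, pvOctet? d with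
    | some x, some y, some z, some w => some (((x * 256 + y) * 256 + z) * 256 + w)
    | _, _, _, _ => none
  | _ => none

-- A's five networks as (network_address, broadcast_address) integer pairs; `ip in network` is
-- int(network_address) ≤ int(ip) ≤ int(broadcast_address) after the version check.
def pvLocalNetworks : List (Nat × Nat) :=
  [(2130706432, 2147483647),   -- 127.0.0.0/8
   (3232235520, 3232301055),   -- 192.168.0.0/16
   (167772160, 184549375),     -- 10.0.0.0/8
   (2886729728, 2887778303),   -- 172.16.0.0/12
   (2851995648, 2852061183)]   -- 169.254.0.0/16

def is_local_ip (ip_str : String) : Bool :=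
  match pvIpAddress? ip_str with
  | none => false                -- ValueError → except branch → False (and valid IPv6 → any(...) is False)
  | some ip => pvLocalNetworks.any (fun nb => decide (nb.1 ≤ ip ∧ ip ≤ nb.2))

-- ===== PORT B =====

-- Source B's for-loop over parts, collecting the octet values (an early `return False` = none).
def pvAltOcts : List (List Char) → Option (List Nat)
  | [] => some []
  | p :: rest =>
    if ¬ PySem.Chars.strIsdigit p ∨ 3 < p.length then none
    else if p.head? = some '0' ∧ 1 < p.length then none
    else
      let v := pvDigitsVal p      -- int(p); exact: p passed the isdigit guard
      if 255 < v then none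
      else (pvAltOcts rest).map (fun os => v :: os)

def is_local_ip_alt (ip_str : String) : Bool :=
  let parts := PySem.Chars.splitOn ip_str.toList ['.']
  if parts.length ≠ 4 then false
  else
    match pvAltOcts parts with
    | some [a, b, c, d] =>
      decide (a = 127 ∨ a = 10 ∨ (a = 192 ∧ b = 168) ∨
              (a = 172 ∧ 16 ≤ b ∧ b ≤ 31) ∨ (a = 169 ∧ b = 254))
    | _ => false

-- ===== PRECONDITION & SPEC =====
def Spec_is_local_ip (ip_str : String) (out : Bool) : Prop := out = is_local_ip_alt ip_str
instance (ip_str : String) (out : Bool) : Decidable (Spec_is_local_ip ip_str out) := by unfold Spec_is_local_ip; infer_instance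

-- ===== CLAIM (what is proved, stated in full; the proofs are below) =====
def Claim_equal_is_local_ip : Prop := ∀ (ip_str : String), Dom_is_local_ip ip_str → Spec_is_local_ip ip_str (is_local_ip ip_str)

-- ===== LEMMAS AND PROOFS =====

theorem pvOctet?_le (cs : List Char) (v : Nat) (h : pvOctet? cs = some v) : v ≤ 255 := by
  unfold pvOctet? at h
  split_ifs at h with h1 h2 h3 h4
  all_goals simp_all

-- B's per-part guards compute exactly A's octet parse.
theorem pvAltOcts_cons (p : List Char) (rest : List (List Char)) :
    pvAltOcts (p :: rest) =
      match pvOctet? p, pvAltOcts rest with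
      | some v, some os => some (v :: os)
      | _, _ => none := by
  rcases p with _ | ⟨c, cs⟩
  · simp [pvAltOcts, pvOctet?, PySem.Chars.strIsdigit]
  · have hdig : PySem.Chars.strIsdigit (c :: cs) = (c :: cs).all PySem.Chars.isdigit := by
      simp [PySem.Chars.strIsdigit]
    simp only [pvAltOcts, pvOctet?, hdig]
    by_cases hall : (c :: cs).all PySem.Chars.isdigit <;>
    by_cases hlen : 3 < (c :: cs).length <;>
    by_cases hz : (c :: cs).head? = some '0' ∧ 1 < (c :: cs).length <;>
    by_cases hv : 255 < pvDigitsVal (c :: cs) <;>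
      simp_all [and_comm] <;>
      cases pvAltOcts rest <;> (try simp) <;> split_ifs <;> simp

theorem main_eq (ip_str : String) : is_local_ip_alt ip_str = is_local_ip ip_str := by
  unfold is_local_ip is_local_ip_alt pvIpAddress?
  rcases hs : PySem.Chars.splitOn ip_str.toList ['.'] with _ | ⟨a, _ | ⟨b, _ | ⟨c, _ | ⟨d, _ | ⟨e, rest⟩⟩⟩⟩⟩ <;>
    try simp
  -- the four-part case
  rw [pvAltOcts_cons, pvAltOcts_cons, pvAltOcts_cons, pvAltOcts_cons]
  rcases ha : pvOctet? a with _ | x <;>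
  rcases hb : pvOctet? b with _ | y <;>
  rcases hc : pvOctet? c with _ | z <;>
  rcases hd : pvOctet? d with _ | w <;>
    simp [pvAltOcts, pvLocalNetworks]
  have bx := pvOctet?_le _ _ ha
  have by' := pvOctet?_le _ _ hb
  have bz := pvOctet?_le _ _ hc
  have bw := pvOctet?_le _ _ hd
  rw [Bool.eq_iff_iff]
  simp only [Bool.or_eq_true, Bool.and_eq_true, decide_eq_true_eq]
  omega

-- ===== VERDICT (by name: the statement is the Claim_ definition above) =====
theorem is_local_ip_spec : Claim_equal_is_local_ip := by
  intro s _
  unfold Spec_is_local_ip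
  exact (main_eq s).symm
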